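-- pv_equiv track=rewrite | github.com/Jatintayal/100_Days_of_Data_Structures | #024/Down to Zero II.py | populate
-- ===== SOURCE A (Python) =====
-- def populate(n):
--     nums = [0, 1, 2, 3, 3] + [None] * (n-4)
--
--     for i in range(2, n + 1):
--         if (nums[i] is None) or  (nums[i] > nums[i-1] + 1):
--             nums[i] = nums[i-1] + 1
--         for j in range(1, i + 1):
--             if i * j > n:
--                 break
--             if (nums[i * j] is None) or  (nums[i] + 1 < nums[i * j]):
--                 nums[j * i] = nums[i] + 1
--     return nums
-- ===== SOURCE B (Python) =====
-- def populate(n):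
--     dp = [0, 1, 2, 3, 3]
--     divs = [[] for _ in range(n + 1)]
--     for d in range(2, n + 1):
--         if d * d > n:
--             break
--         for t in range(d * d, n + 1, d):
--             divs[t].append(d)
--     for k in range(5, n + 1):
--         best = dp[k - 1] + 1
--         for d in divs[k]:
--             if dp[k // d] + 1 < best:
--                 best = dp[k // d] + 1
--         dp.append(best)
--     return dp
-- ===== Notes on version B (the rewrite author's own statement) =====
-- stated objective: alternative
-- what changed: Replaces A's interleaved multiplicative relaxation sieve (each index pushes its value plus one into its multiples inside a shared table of Optional cells, with None-checks and conditional min-writes) by a two-phase pull-based DP: first a standalone pass tabulates each index's small divisors, then each dp entry is computed directly as the min of the previous entry plus one and the entries at the complementary divisors plus one, building the table append-only with plain ints.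
import Mathlib
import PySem

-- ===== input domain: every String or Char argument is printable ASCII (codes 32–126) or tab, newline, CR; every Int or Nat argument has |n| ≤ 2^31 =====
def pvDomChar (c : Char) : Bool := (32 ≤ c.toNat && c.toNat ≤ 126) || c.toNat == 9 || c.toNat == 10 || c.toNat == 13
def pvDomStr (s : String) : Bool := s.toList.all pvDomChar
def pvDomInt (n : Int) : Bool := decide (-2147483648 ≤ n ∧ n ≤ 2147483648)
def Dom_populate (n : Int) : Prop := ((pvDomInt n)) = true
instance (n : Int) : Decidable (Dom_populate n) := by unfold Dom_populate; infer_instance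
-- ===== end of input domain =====

-- B replaces A's forward multiplicative sieve by a per-index trial-divisor DP pass (objective: alternative, not faster).

-- ===== PORT A =====
-- the write pattern A uses twice: "if (nums[t] is None) or (v < nums[t]./ nums[t] > v): nums[t] = v"
-- (all of A's reads/writes are at non-negative in-range indices, so pyGetD/pySetD are exact)
def aRelax (nums : List (Option Int)) (t : Int) (v : Int) : List (Option Int) :=
  match PySem.List.pyGetD nums t none with
  | none => PySem.List.pySetD nums t (some v)
  | some w => if v < w then PySem.List.pySetD nums t (some v) else nums

-- inner loop "for j in range(1, i+1): if i*j > n: break; …": the break guard is at the top of the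
-- body, so takeWhile keeps exactly the executed iterations; nums[i] is re-read each iteration as in
-- the Python, and is never None when read (.getD 0 only totalizes the "+ 1")
def aInner (n i : Int) (nums : List (Option Int)) : List (Option Int) :=
  ((PySem.List.pyRange 1 (i + 1)).takeWhile (fun j => decide (i * j ≤ n))).foldl
    (fun nums j => aRelax nums (i * j) ((PySem.List.pyGetD nums i none).getD 0 + 1)) nums

-- [None] * (n-4) is empty for n ≤ 4, which Int.toNat matches
def populate (n : Int) : List (Option Int) :=
  let nums0 : List (Option Int) :=
    [some 0, some 1, some 2, some 3, some 3] ++ List.replicate (n - 4).toNat none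
  (PySem.List.pyRange 2 (n + 1)).foldl
    (fun nums i => aInner n i (aRelax nums i ((PySem.List.pyGetD nums (i - 1) none).getD 0 + 1)))
    nums0

-- ===== PORT B =====
-- "divs[t].append(d)" (all indices non-negative and in range, so pyGetD/pySetD are exact)
def bAppend (d : Int) (divs : List (List Int)) (t : Int) : List (List Int) :=
  PySem.List.pySetD divs t (PySem.List.pyGetD divs t [] ++ [d])

-- phase 1: "divs = [[] for _ in range(n+1)]; for d in range(2, n+1): if d*d > n: break;
--           for t in range(d*d, n+1, d): divs[t].append(d)"
-- (the break guard is at the top of the body, so takeWhile keeps exactly the executed iterations)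
def bDivs (n : Int) : List (List Int) :=
  ((PySem.List.pyRange 2 (n + 1)).takeWhile (fun d => decide (d * d ≤ n))).foldl
    (fun divs d => (PySem.List.pyRange (d * d) (n + 1) d).foldl (bAppend d) divs)
    (List.replicate (n + 1).toNat [])

-- phase 2 inner loop: "best = dp[k-1]+1; for d in divs[k]: if dp[k//d]+1 < best: best = dp[k//d]+1"
def bBest (dp : List Int) (k : Int) (cell : List Int) : Int :=
  cell.foldl
    (fun best d =>
      if PySem.List.pyGetD dp (PySem.Int.floordiv k d) 0 + 1 < best then
        PySem.List.pyGetD dp (PySem.Int.floordiv k d) 0 + 1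
      else best)
    (PySem.List.pyGetD dp (k - 1) 0 + 1)

-- B's dp holds plain ints; .map some is the type-convention embedding list[int] ⊆ list[Optional[int]]
def populate_alt (n : Int) : List (Option Int) :=
  let divs := bDivs n
  ((PySem.List.pyRange 5 (n + 1)).foldl
    (fun dp k => dp ++ [bBest dp k (PySem.List.pyGetD divs k [])]) [0, 1, 2, 3, 3]).map some

-- ===== PRECONDITION & SPEC =====
def Spec_populate (n : Int) (out : List (Option Int)) : Prop := out = populate_alt n
instance (n : Int) (out : List (Option Int)) : Decidable (Spec_populate n out) := by
  unfold Spec_populate; infer_instance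

-- ===== CLAIM (what is proved, stated in full; the proofs are below) =====
def Claim_equal_populate : Prop := ∀ (n : Int), Dom_populate n → Spec_populate n (populate n)

-- ===== LEMMAS AND PROOFS =====

-- reference form of the dp recurrence: trial-divisor scan (proof-side only)
def bInner (dp : List Int) (k : Int) : Int :=
  ((PySem.List.pyRange 2 k).takeWhile (fun d => decide (d * d ≤ k))).foldl
    (fun best d =>
      if PySem.Int.mod k d = 0 ∧ PySem.List.pyGetD dp (PySem.Int.floordiv k d) 0 + 1 < best then
        PySem.List.pyGetD dp (PySem.Int.floordiv k d) 0 + 1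
      else best)
    (PySem.List.pyGetD dp (k - 1) 0 + 1)

-- common reference table: build m = the finished dp table for n = m + 4
def build : Nat → List Int
  | 0 => [0, 1, 2, 3, 3]
  | m + 1 => build m ++ [bInner (build m) ((m : Int) + 5)]

def f (k : Nat) : Int := (build k).getD k 0

-- the value a sieve cell holds: None until the first write, then min of all written values
def minO (l : List Int) : Option Int :=
  l.foldl (fun a x => some (match a with | none => x | some v => min v x)) none

def mfold (a : Int) (l : List Int) : Int := l.foldl min a

lemma mfold_cons (a x : Int) (l : List Int) : mfold a (x :: l) = mfold (min a x) l := rfl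

-- candidate values written into cell t by outer iterations i = 2..m of A's sieve
def C (t : Nat) (m : Int) : List Int :=
  ((PySem.List.pyRange 2 (m + 1)).filter
      (fun c => decide (PySem.Int.mod (t : Int) c = 0 ∧ (t : Int) ≤ c * c))).map
    (fun c => f c.toNat + 1)

-- A's sieve invariant after outer iterations 2..m
def InvA (n m : Int) (nums : List (Option Int)) : Prop :=
  nums.length = n.toNat + 1 ∧ ∀ t : Nat, t ≤ n.toNat →
    ((t ≤ 4 ∨ (t : Int) ≤ m) → nums.getD t none = some (f t)) ∧
    (4 < t → m < (t : Int) → nums.getD t none = minO (C t m))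

lemma length_build (m : Nat) : (build m).length = m + 5 := by
  induction m with
  | zero => rfl
  | succ m ih => simp [build, ih]

lemma build_prefix {m m' : Nat} (h : m ≤ m') : build m <+: build m' := by
  induction m' with
  | zero => simp [Nat.le_zero.mp h]
  | succ m' ih =>
    rcases Nat.lt_or_ge m (m' + 1) with h' | h'
    · exact (ih (by omega)).trans ⟨_, rfl⟩
    · have : m = m' + 1 := by omega
      simp [this]

lemma getD_prefix {l l' : List Int} (h : l <+: l') {k : Nat} (hk : k < l.length) :
    l'.getD k 0 = l.getD k 0 := by
  obtain ⟨r, rfl⟩ := h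
  simp [List.getD_eq_getElem?_getD, List.getElem?_append_left hk]

lemma getD_build {m k : Nat} (h : k < m + 5) : (build m).getD k 0 = f k := by
  unfold f
  rcases Nat.lt_or_ge m k with h' | h'
  · exact (getD_prefix (build_prefix (by omega : m ≤ k)) (by simp [length_build]; omega)).symm
  · exact getD_prefix (build_prefix h') (by simp [length_build])

-- ---- min-fold algebra ----

lemma optfold (l : List Int) (a : Int) :
    l.foldl (fun a x => some (match a with | none => x | some v => min v x)) (some a) =
      some (mfold a l) := by
  induction l generalizing a with
  | nil => rfl
  | cons x l ih => rw [List.foldl_cons, mfold_cons]; exact ih (min a x)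

lemma minO_cons (x : Int) (l : List Int) : minO (x :: l) = some (mfold x l) := by
  rw [minO, List.foldl_cons]; exact optfold l x

lemma minO_snoc (l : List Int) (v : Int) :
    minO (l ++ [v]) = some (match minO l with | none => v | some w => min w v) := by
  simp [minO, List.foldl_append]

lemma mfold_out (a b : Int) (l : List Int) : mfold (min a b) l = min a (mfold b l) := by
  induction l generalizing b with
  | nil => rfl
  | cons x l ih => rw [mfold_cons, mfold_cons, min_assoc, ih]

lemma matchmin_eq_mfold (l : List Int) (v : Int) :
    (match minO l with | none => v | some w => min w v) = mfold v l := by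
  cases l with
  | nil => rfl
  | cons x l =>
    rw [minO_cons]
    show min (mfold x l) v = mfold v (x :: l)
    rw [mfold_cons, mfold_out v x l]
    exact min_comm (mfold x l) v

lemma minO_snoc_mfold (l : List Int) (v : Int) : minO (l ++ [v]) = some (mfold v l) := by
  rw [minO_snoc, matchmin_eq_mfold]

lemma mfold_le_init (a : Int) (l : List Int) : mfold a l ≤ a := by
  induction l generalizing a with
  | nil => exact le_refl a
  | cons x l ih => rw [mfold_cons]; exact (ih (min a x)).trans (min_le_left _ _)

lemma mfold_le_mem {x : Int} {l : List Int} (h : x ∈ l) (a : Int) : mfold a l ≤ x := by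
  induction l generalizing a with
  | nil => simp at h
  | cons y l ih =>
    rw [mfold_cons]
    rcases List.mem_cons.mp h with rfl | h
    · exact (mfold_le_init _ _).trans (min_le_right _ _)
    · exact ih h _

lemma mfold_cases (a : Int) (l : List Int) : mfold a l = a ∨ mfold a l ∈ l := by
  induction l generalizing a with
  | nil => left; rfl
  | cons x l ih =>
    rw [mfold_cons]
    rcases ih (min a x) with h | h
    · rcases le_total a x with h' | h'
      · left; rw [h, min_eq_left h']
      · right; rw [h, min_eq_right h']; exact List.mem_cons_self
    · right; exact List.mem_cons_of_mem _ h

lemma mfold_eq_of_mem_iff {l₁ l₂ : List Int} (h : ∀ x, x ∈ l₁ ↔ x ∈ l₂) (a : Int) :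
    mfold a l₁ = mfold a l₂ := by
  apply le_antisymm
  · rcases mfold_cases a l₂ with h' | h'
    · rw [h']; exact mfold_le_init _ _
    · exact mfold_le_mem ((h _).mpr h') _
  · rcases mfold_cases a l₁ with h' | h'
    · rw [h']; exact mfold_le_init _ _
    · exact mfold_le_mem ((h _).mp h') _

-- ---- takeWhile on ranges ----

lemma takeWhile_antitone_eq_filter (p : Int → Bool) :
    ∀ (l : List Int), l.Pairwise (· < ·) →
      (∀ x y, x ∈ l → y ∈ l → x ≤ y → p y → p x) → l.takeWhile p = l.filter p := by
  intro l
  induction l with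
  | nil => intro _ _; rfl
  | cons x l ih =>
    intro hp hmono
    rcases List.pairwise_cons.mp hp with ⟨hx, hl⟩
    by_cases hpx : p x
    · simp only [List.takeWhile_cons, List.filter_cons, hpx, if_pos]
      rw [ih hl (fun a b ha hb hab hpb => hmono a b (by simp [ha]) (by simp [hb]) hab hpb)]
    · have : ∀ y ∈ l, ¬ p y := by
        intro y hy hpy
        exact hpx (hmono x y List.mem_cons_self (by simp [hy]) (le_of_lt (hx y hy)) hpy)
      simp only [List.takeWhile_cons, List.filter_cons, hpx]
      simp [List.filter_eq_nil_iff.mpr this]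

lemma takeWhile_pyRange_le_aux (n : Nat) : ∀ (a b M : Int), (b - a).toNat ≤ n →
    (PySem.List.pyRange a b).takeWhile (fun x => decide (x ≤ M)) =
      PySem.List.pyRange a (min b (M + 1)) := by
  induction n with
  | zero =>
    intro a b M h
    rw [PySem.List.pyRange_one_eq_nil (by omega),
      PySem.List.pyRange_one_eq_nil (by omega : min b (M + 1) ≤ a)]
    rfl
  | succ n ih =>
    intro a b M h
    by_cases hba : b ≤ a
    · rw [PySem.List.pyRange_one_eq_nil hba,
        PySem.List.pyRange_one_eq_nil (by omega : min b (M + 1) ≤ a)]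
      rfl
    · rw [PySem.List.pyRange_one_cons (by omega : a < b)]
      by_cases hM : a ≤ M
      · rw [List.takeWhile_cons_of_pos (by simpa), ih (a + 1) b M (by omega),
          PySem.List.pyRange_one_cons (by omega : a < min b (M + 1))]
      · rw [List.takeWhile_cons_of_neg (by simp only [decide_eq_true_eq]; omega),
          PySem.List.pyRange_one_eq_nil (by omega : min b (M + 1) ≤ a)]

lemma takeWhile_pyRange_le (a b M : Int) :
    (PySem.List.pyRange a b).takeWhile (fun x => decide (x ≤ M)) =
      PySem.List.pyRange a (min b (M + 1)) := by
  exact takeWhile_pyRange_le_aux (b - a).toNat a b M le_rfl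

-- ---- B's step as a min-fold over divisor candidates ----

lemma bInner_eq_mfold (dp : List Int) (k : Int) :
    bInner dp k =
      mfold (PySem.List.pyGetD dp (k - 1) 0 + 1)
        (((PySem.List.pyRange 2 k).filter
            (fun d => decide (d * d ≤ k) && decide (PySem.Int.mod k d = 0))).map
          (fun d => PySem.List.pyGetD dp (PySem.Int.floordiv k d) 0 + 1)) := by
  unfold bInner
  rw [takeWhile_antitone_eq_filter _ _ (PySem.List.pairwise_lt_pyRange_one 2 k)
      (by
        intro x y hx hy hxy hpy
        simp only [decide_eq_true_eq] at *
        have hx2 : 2 ≤ x := (PySem.List.mem_pyRange_one.mp hx).1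
        nlinarith)]
  conv_rhs =>
    rw [show (fun d => decide (d * d ≤ k) && decide (PySem.Int.mod k d = 0)) =
        (fun d => decide (PySem.Int.mod k d = 0) && decide (d * d ≤ k)) from by
      funext d; exact Bool.and_comm _ _]
    rw [← List.filter_filter, mfold, List.foldl_map, List.foldl_filter]
  congr 1
  funext b d
  by_cases h1 : PySem.Int.mod k d = 0 <;>
    by_cases h2 : PySem.List.pyGetD dp (PySem.Int.floordiv k d) 0 + 1 < b <;>
      simp [h1, h2, min_def]

-- the divisor bijection d ↔ k/d: the recurrence characterisation of f
lemma f_char (k : Nat) (hk : 5 ≤ k) :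
    f k = mfold (f (k - 1) + 1) (C k ((k : Int) - 1)) := by
  have hlen : (build (k - 5)).length = k := by rw [length_build]; omega
  have h1 : f k = bInner (build (k - 5)) ((k : Nat) : Int) := by
    have h0 : f k = (build (k - 5 + 1)).getD k 0 := (getD_build (by omega)).symm
    rw [h0, show build (k - 5 + 1) =
        build (k - 5) ++ [bInner (build (k - 5)) ((↑(k - 5) : Int) + 5)] from rfl]
    rw [List.getD_eq_getElem?_getD, List.getElem?_append_right (by omega), hlen]
    simp only [Nat.sub_self, List.getElem?_cons_zero, Option.getD_some]
    congr 1
    omega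
  rw [h1, bInner_eq_mfold]
  have hinit : PySem.List.pyGetD (build (k - 5)) (((k : Nat) : Int) - 1) 0 = f (k - 1) := by
    rw [show (((k : Nat) : Int) - 1) = ((k - 1 : Nat) : Int) from by omega,
      PySem.List.pyGetD_natCast]
    exact getD_build (by omega)
  rw [hinit]
  apply mfold_eq_of_mem_iff
  intro x
  unfold C
  rw [show ((k : Int) - 1 + 1) = ((k : Nat) : Int) from by ring]
  simp only [List.mem_map, List.mem_filter, PySem.List.mem_pyRange_one, Bool.and_eq_true,
    decide_eq_true_eq]
  constructor
  · rintro ⟨d, ⟨⟨hd2, hdk⟩, hdd, hmod⟩, rfl⟩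
    rw [PySem.Int.mod_eq_zero_iff_dvd] at hmod
    obtain ⟨q, hq⟩ := hmod
    have hd0 : (0 : Int) < d := by omega
    have hdq : d ≤ q := by nlinarith
    have hqk : q < (k : Int) := by nlinarith
    have hfd : PySem.Int.floordiv ((k : Nat) : Int) d = q := by
      rw [PySem.Int.floordiv_eq_ediv_of_pos hd0, hq, Int.mul_ediv_cancel_left _ (by omega)]
    refine ⟨q, ⟨⟨by omega, hqk⟩, ?_, by nlinarith⟩, ?_⟩
    · rw [PySem.Int.mod_eq_zero_iff_dvd]; exact ⟨d, by rw [hq]; ring⟩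
    · rw [hfd, show q = ((q.toNat : Nat) : Int) from (Int.toNat_of_nonneg (by omega)).symm,
        PySem.List.pyGetD_natCast, getD_build (by omega)]
      congr 2
  · rintro ⟨c, ⟨⟨hc2, hck⟩, hmod, hle⟩, rfl⟩
    rw [PySem.Int.mod_eq_zero_iff_dvd] at hmod
    obtain ⟨q, hq⟩ := hmod
    have hc0 : (0 : Int) < c := by omega
    have hq2 : (2 : Int) ≤ q := by nlinarith
    have hqc : q ≤ c := by nlinarith
    have hfd : PySem.Int.floordiv ((k : Nat) : Int) q = c := by
      rw [PySem.Int.floordiv_eq_ediv_of_pos (by omega), show ((k : Nat) : Int) = q * c from by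
        rw [hq]; ring, Int.mul_ediv_cancel_left _ (by omega)]
    refine ⟨q, ⟨⟨by omega, by omega⟩, by nlinarith, ?_⟩, ?_⟩
    · rw [PySem.Int.mod_eq_zero_iff_dvd]; exact ⟨c, by rw [hq]; ring⟩
    · rw [hfd, show c = ((c.toNat : Nat) : Int) from (Int.toNat_of_nonneg (by omega)).symm,
        PySem.List.pyGetD_natCast, getD_build (by omega)]
      congr 2

-- ---- cell updates ----

lemma getD_set_self (l : List (Option Int)) (t : Nat) (h : t < l.length) (v : Option Int) :
    (l.set t v).getD t none = v := by
  simp [List.getD_eq_getElem?_getD, h]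

lemma aRelax_length (nums : List (Option Int)) (t : Int) (ht : 0 ≤ t) (v : Int) :
    (aRelax nums t v).length = nums.length := by
  unfold aRelax
  rw [PySem.List.pyGetD_of_nonneg _ _ ht]
  split <;> [skip; split] <;> simp [PySem.List.pySetD_of_nonneg _ _ ht]

lemma aRelax_getD_ne (nums : List (Option Int)) (t : Int) (ht : 0 ≤ t) (v : Int)
    {s : Nat} (hs : s ≠ t.toNat) :
    (aRelax nums t v).getD s none = nums.getD s none := by
  unfold aRelax
  rw [PySem.List.pyGetD_of_nonneg _ _ ht]
  split <;> [skip; split] <;>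
    simp [PySem.List.pySetD_of_nonneg _ _ ht, List.getD_eq_getElem?_getD,
      List.getElem?_set_ne (show t.toNat ≠ s from fun h => hs h.symm)]

lemma aRelax_some (nums : List (Option Int)) (t : Int) (ht : 0 ≤ t)
    (hlt : t.toNat < nums.length) (v w : Int) (hw : nums.getD t.toNat none = some w) :
    (aRelax nums t v).getD t.toNat none = some (min w v) := by
  unfold aRelax
  rw [PySem.List.pyGetD_of_nonneg _ _ ht, hw]
  show (if v < w then PySem.List.pySetD nums t (some v) else nums).getD t.toNat none =
    some (min w v)
  by_cases hvw : v < w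
  · rw [if_pos hvw, PySem.List.pySetD_of_nonneg _ _ ht, getD_set_self _ _ hlt,
      min_eq_right (by omega)]
  · rw [if_neg hvw, hw, min_eq_left (by omega)]

lemma aRelax_minO (nums : List (Option Int)) (t : Int) (ht : 0 ≤ t)
    (hlt : t.toNat < nums.length) (v : Int) (l : List Int)
    (hw : nums.getD t.toNat none = minO l) :
    (aRelax nums t v).getD t.toNat none = minO (l ++ [v]) := by
  rw [minO_snoc]
  cases h : minO l with
  | none =>
    unfold aRelax
    rw [PySem.List.pyGetD_of_nonneg _ _ ht, hw, h]
    show (PySem.List.pySetD nums t (some v)).getD t.toNat none = some v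
    rw [PySem.List.pySetD_of_nonneg _ _ ht, getD_set_self _ _ hlt]
  | some w =>
    rw [aRelax_some nums t ht hlt v w (by rw [hw, h])]

-- candidate list one outer iteration later
lemma C_append (t : Nat) (i : Int) (h2 : 2 ≤ i) :
    C t i = C t (i - 1) ++
      (if PySem.Int.mod (t : Int) i = 0 ∧ (t : Int) ≤ i * i then [f i.toNat + 1] else []) := by
  unfold C
  rw [show i - 1 + 1 = i from by ring,
    show i + 1 = i + 1 from rfl,
    PySem.List.pyRange_one_succ_right (by omega : (2 : Int) ≤ i),
    List.filter_append, List.map_append]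
  congr 1
  by_cases h : PySem.Int.mod (t : Int) i = 0 ∧ (t : Int) ≤ i * i
  · rw [if_pos h]
    simp [h]
  · rw [if_neg h]
    simp only [List.filter_cons, decide_eq_true_eq]
    rw [if_neg (by simpa using h)]
    simp

-- the sieve cell values that iterations j = 1..jj of outer iteration i have written
def extra (i : Int) (t : Nat) (jj : Int) : List Int :=
  if PySem.Int.mod (t : Int) i = 0 ∧ (t : Int) ≤ i * i ∧ (t : Int) ≤ i * jj then
    [f i.toNat + 1]
  else []

-- A's sieve invariant inside outer iteration i, after inner iterations 1..jj
def InvB (n i jj : Int) (nums : List (Option Int)) : Prop :=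
  nums.length = n.toNat + 1 ∧ ∀ t : Nat, t ≤ n.toNat →
    ((t ≤ 4 ∨ (t : Int) ≤ i) → nums.getD t none = some (f t)) ∧
    (4 < t → i < (t : Int) → nums.getD t none = minO (C t (i - 1) ++ extra i t jj))

lemma invA_init (n : Int) (hn : 5 ≤ n) :
    InvA n 1 ([some 0, some 1, some 2, some 3, some 3] ++ List.replicate (n - 4).toNat none) := by
  constructor
  · simp; omega
  · intro t ht
    constructor
    · intro hcase
      have ht4 : t ≤ 4 := by omega
      rw [List.getD_eq_getElem?_getD, List.getElem?_append_left (by simp; omega)]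
      interval_cases t <;> simp <;> decide
    · intro h4 _
      rw [List.getD_eq_getElem?_getD, List.getElem?_append_right (by simp; omega)]
      rw [show C t 1 = [] from by
        unfold C; rw [show (1 : Int) + 1 = 2 from rfl, PySem.List.pyRange_one_eq_nil le_rfl]; rfl]
      simp only [List.length_cons, List.length_nil]
      rw [List.getElem?_replicate]
      rw [if_pos (by omega)]
      rfl

lemma inner_step (n i j : Int) (h2 : 2 ≤ i) (hin : i ≤ n) (hn : 5 ≤ n)
    (hj1 : 1 ≤ j) (hji : j ≤ i) (hjn : i * j ≤ n) (nums : List (Option Int))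
    (h : InvB n i (j - 1) nums) :
    InvB n i j (aRelax nums (i * j) ((PySem.List.pyGetD nums i none).getD 0 + 1)) := by
  obtain ⟨hlen, hinv⟩ := h
  have hvi : PySem.List.pyGetD nums i none = some (f i.toNat) := by
    rw [PySem.List.pyGetD_of_nonneg _ _ (by omega)]
    exact (hinv i.toNat (by omega)).1 (Or.inr (by omega))
  rw [hvi]
  simp only [Option.getD_some]
  rcases eq_or_lt_of_le hj1 with hj | hj2
  · -- j = 1: the write targets cell i itself and never fires
    have hre : aRelax nums (i * 1) (f i.toNat + 1) = nums := by
      unfold aRelax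
      rw [mul_one, PySem.List.pyGetD_of_nonneg _ _ (by omega),
        (hinv i.toNat (by omega)).1 (Or.inr (by omega))]
      show (if f i.toNat + 1 < f i.toNat then _ else nums) = nums
      rw [if_neg (by omega)]
    rw [← hj, hre]
    refine ⟨hlen, fun t ht => ⟨(hinv t ht).1, fun h4 hit => ?_⟩⟩
    rw [(hinv t ht).2 h4 hit]
    unfold extra
    rw [← hj]
    rw [if_neg (by rintro ⟨-, -, h3⟩; omega), if_neg (by rintro ⟨-, -, h3⟩; omega)]
  · -- 2 ≤ j: the write targets cell i*j > i
    have hij4 : (4 : Int) ≤ i * j := by nlinarith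
    have hiji : i < i * j := by nlinarith
    have htN : (i * j).toNat ≤ n.toNat := by omega
    have htlt : (i * j).toNat < nums.length := by omega
    have hcast : ((i * j).toNat : Int) = i * j := Int.toNat_of_nonneg (by omega)
    constructor
    · rw [aRelax_length _ _ (by omega)]; exact hlen
    · intro t ht
      by_cases hteq : t = (i * j).toNat
      · subst hteq
        constructor
        · intro hcase
          have h4 : (i * j) ≤ 4 := by
            rcases hcase with h | h
            · omega
            · omega
          -- then i = 2, j = 2, t = 4
          have hi2 : i = 2 := by nlinarith
          have hjv : j = 2 := by nlinarith
          have ht4 : (i * j).toNat = 4 := by rw [hi2, hjv]; rfl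
          rw [aRelax_some nums (i * j) (by omega) htlt _ (f 4) (by
            rw [ht4]; exact (hinv 4 (by omega)).1 (Or.inl (by omega)))]
          rw [ht4, hi2]
          rw [show min (f 4) (f (2 : Int).toNat + 1) = f 4 from by decide]
        · intro h44 hit
          -- t ≥ 5: cell carried minO (C t (i-1)) (extra for j-1 is empty), gains candidate
          have hold : nums.getD (i * j).toNat none = minO (C (i * j).toNat (i - 1)) := by
            rw [(hinv _ htN).2 h44 hit]
            unfold extra
            rw [if_neg (by
              rintro ⟨-, -, h3⟩
              rw [hcast] at h3
              nlinarith)]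
            rw [List.append_nil]
          rw [aRelax_minO nums (i * j) (by omega) htlt _ _ hold]
          unfold extra
          rw [if_pos ⟨by
              rw [hcast, PySem.Int.mod_eq_zero_iff_dvd]; exact Dvd.intro j rfl,
            by rw [hcast]; nlinarith,
            by rw [hcast]⟩]
      · -- untouched cell
        have hne : t ≠ (i * j).toNat := hteq
        rw [aRelax_getD_ne nums (i * j) (by omega) _ hne]
        refine ⟨(hinv t ht).1, fun h4 hit => ?_⟩
        rw [(hinv t ht).2 h4 hit]
        unfold extra
        by_cases hc : PySem.Int.mod (t : Int) i = 0 ∧ (t : Int) ≤ i * i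
        · obtain ⟨hmod, hii⟩ := hc
          rw [PySem.Int.mod_eq_zero_iff_dvd] at hmod
          obtain ⟨q, hq⟩ := hmod
          have hq0 : 0 < q := by nlinarith
          have : ¬ ((t : Int) = i * j) := by
            intro hcontra
            apply hne
            omega
          by_cases hle : (t : Int) ≤ i * (j - 1)
          · rw [if_pos ⟨by rw [PySem.Int.mod_eq_zero_iff_dvd]; exact ⟨q, hq⟩, hii, hle⟩,
              if_pos ⟨by rw [PySem.Int.mod_eq_zero_iff_dvd]; exact ⟨q, hq⟩, hii, by nlinarith⟩]
          · have : ¬ ((t : Int) ≤ i * j) := by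
              intro hcontra
              -- i*(j-1) < i*q = t ≤ i*j forces q = j, i.e. t = i*j
              have h1 : j - 1 < q := by nlinarith
              have h2 : q ≤ j := by nlinarith
              have : q = j := by omega
              subst this
              exact hne (by omega)
            rw [if_neg (by rintro ⟨-, -, h3⟩; exact hle h3),
              if_neg (by rintro ⟨-, -, h3⟩; exact this h3)]
        · rw [if_neg (by rintro ⟨ha, hb, -⟩; exact hc ⟨ha, hb⟩),
            if_neg (by rintro ⟨ha, hb, -⟩; exact hc ⟨ha, hb⟩)]

lemma inner_fold (n i : Int) (h2 : 2 ≤ i) (hin : i ≤ n) (hn : 5 ≤ n) :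
    ∀ (J : Nat) (nums : List (Option Int)), (J : Int) ≤ i → i * J ≤ n → InvB n i 0 nums →
      InvB n i J ((PySem.List.pyRange 1 ((J : Int) + 1)).foldl
        (fun nums j => aRelax nums (i * j) ((PySem.List.pyGetD nums i none).getD 0 + 1)) nums) := by
  intro J
  induction J with
  | zero =>
    intro nums _ _ h
    rw [show ((0 : Nat) : Int) + 1 = 1 from rfl, PySem.List.pyRange_one_eq_nil le_rfl]
    exact h
  | succ J ih =>
    intro nums hJi hJn h
    have hJi' : (J : Int) ≤ i := by push_cast at hJi ⊢; omega
    have hJn' : i * J ≤ n := by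
      have : i * (J : Int) ≤ i * ((J : Int) + 1) := by nlinarith
      push_cast at hJn; nlinarith
    rw [show ((J + 1 : Nat) : Int) + 1 = ((J : Int) + 1) + 1 from by push_cast; ring,
      PySem.List.pyRange_one_succ_right (by omega), List.foldl_append, List.foldl_cons,
      List.foldl_nil]
    have := inner_step n i ((J : Int) + 1) h2 hin hn (by omega) (by push_cast at hJi; omega)
      (by push_cast at hJn; omega) _ (by
        rw [show (J : Int) + 1 - 1 = (J : Int) from by ring]
        exact ih nums hJi' hJn' h)
    rw [show ((J + 1 : Nat) : Int) = (J : Int) + 1 from by push_cast; ring]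
    exact this

lemma first_branch (n i : Int) (h2 : 2 ≤ i) (hin : i ≤ n) (hn : 5 ≤ n)
    (nums : List (Option Int)) (h : InvA n (i - 1) nums) :
    InvB n i 0 (aRelax nums i ((PySem.List.pyGetD nums (i - 1) none).getD 0 + 1)) := by
  obtain ⟨hlen, hinv⟩ := h
  have hiN : i.toNat ≤ n.toNat := by omega
  have hilt : i.toNat < nums.length := by omega
  have hv : PySem.List.pyGetD nums (i - 1) none = some (f (i - 1).toNat) := by
    rw [PySem.List.pyGetD_of_nonneg _ _ (by omega)]
    exact (hinv (i - 1).toNat (by omega)).1 (Or.inr (by omega))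
  rw [hv]
  simp only [Option.getD_some]
  constructor
  · rw [aRelax_length _ _ (by omega)]; exact hlen
  · intro t ht
    by_cases hteq : t = i.toNat
    · subst hteq
      constructor
      · intro _
        rcases le_or_gt i 4 with hi4 | hi5
        · -- i ∈ {2,3,4}: the write never fires on the preset values
          have hold : nums.getD i.toNat none = some (f i.toNat) :=
            (hinv i.toNat hiN).1 (Or.inl (by omega))
          rw [aRelax_some nums i (by omega) hilt _ _ hold]
          have : min (f i.toNat) (f (i - 1).toNat + 1) = f i.toNat := by
            interval_cases i <;> decide
          rw [this]
        · -- i ≥ 5: pending min over large divisors plus dp[i-1]+1 gives f i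
          have hold : nums.getD i.toNat none = minO (C i.toNat (i - 1)) :=
            (hinv i.toNat hiN).2 (by omega) (by omega)
          rw [aRelax_minO nums i (by omega) hilt _ _ hold, minO_snoc_mfold]
          have hchar := f_char i.toNat (by omega)
          rw [show ((i.toNat : Nat) : Int) - 1 = i - 1 from by omega] at hchar
          rw [show (i - 1).toNat = i.toNat - 1 from by omega]
          exact congrArg some hchar.symm
      · intro _ hit
        omega
    · rw [aRelax_getD_ne nums i (by omega) _ hteq]
      constructor
      · intro hcase
        refine (hinv t ht).1 ?_
        rcases hcase with hc | hc
        · exact Or.inl hc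
        · right
          rcases eq_or_lt_of_le hc with he | hl
          · exact absurd (by omega) hteq
          · omega
      · intro h4 hit
        rw [(hinv t ht).2 h4 (by omega)]
        unfold extra
        rw [if_neg (by rintro ⟨-, -, h3⟩; omega), List.append_nil]

lemma invB_to_invA (n i : Int) (h2 : 2 ≤ i) (_hin : i ≤ n) (hn : 5 ≤ n)
    (nums : List (Option Int)) (h : InvB n i (min i (n / i)) nums) : InvA n i nums := by
  obtain ⟨hlen, hinv⟩ := h
  refine ⟨hlen, fun t ht => ⟨(hinv t ht).1, fun h4 hit => ?_⟩⟩
  rw [(hinv t ht).2 h4 hit, C_append t i h2]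
  congr 1
  unfold extra
  by_cases hc : PySem.Int.mod (t : Int) i = 0 ∧ (t : Int) ≤ i * i
  · obtain ⟨hmod, hii⟩ := hc
    have hdvd := (PySem.Int.mod_eq_zero_iff_dvd _ _).mp hmod
    obtain ⟨q, hq⟩ := hdvd
    have hi0 : (0 : Int) < i := by omega
    have hq0 : 0 < q := by nlinarith
    have hqi : q ≤ i := by nlinarith
    have hqn : q ≤ n / i := by
      rw [Int.le_ediv_iff_mul_le hi0]
      nlinarith [show (t : Int) ≤ n from by omega]
    rw [if_pos ⟨hmod, hii, by
        calc (t : Int) = i * q := hq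
        _ ≤ i * min i (n / i) := by
          apply mul_le_mul_of_nonneg_left (le_min hqi hqn) (by omega)⟩,
      if_pos ⟨hmod, hii⟩]
  · rw [if_neg (by rintro ⟨ha, hb, -⟩; exact hc ⟨ha, hb⟩),
      if_neg (by rintro ⟨ha, hb⟩; exact hc ⟨ha, hb⟩)]

-- A's inner loop is exactly the j = 1 .. min i (n//i) fold
lemma aInner_eq (n i : Int) (h2 : 2 ≤ i) (_hin : i ≤ n) (_hn : 5 ≤ n)
    (nums : List (Option Int)) :
    aInner n i nums = (PySem.List.pyRange 1 (min i (n / i) + 1)).foldl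
      (fun nums j => aRelax nums (i * j) ((PySem.List.pyGetD nums i none).getD 0 + 1)) nums := by
  unfold aInner
  congr 1
  rw [show (fun j => decide (i * j ≤ n)) = (fun j : Int => decide (j ≤ n / i)) from by
    funext j
    simp only [decide_eq_decide]
    rw [Int.le_ediv_iff_mul_le (by omega : (0 : Int) < i), mul_comm]]
  rw [takeWhile_pyRange_le]
  congr 1
  have h1 : 1 ≤ n / i := by rw [Int.le_ediv_iff_mul_le (by omega : (0 : Int) < i)]; omega
  omega

lemma outer_fold (n : Int) (hn : 5 ≤ n) : ∀ (M : Nat), (M : Int) + 1 ≤ n →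
    InvA n ((M : Int) + 1) ((PySem.List.pyRange 2 ((M : Int) + 1 + 1)).foldl
      (fun nums i => aInner n i (aRelax nums i ((PySem.List.pyGetD nums (i - 1) none).getD 0 + 1)))
      ([some 0, some 1, some 2, some 3, some 3] ++ List.replicate (n - 4).toNat none)) := by
  intro M
  induction M with
  | zero =>
    intro _
    rw [show ((0 : Nat) : Int) + 1 + 1 = 2 from rfl, PySem.List.pyRange_one_eq_nil le_rfl]
    exact invA_init n hn
  | succ M ih =>
    intro hM
    push_cast at hM ⊢
    rw [show (M : Int) + 1 + 1 + 1 = ((M : Int) + 1 + 1) + 1 from by ring,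
      PySem.List.pyRange_one_succ_right (by omega), List.foldl_append, List.foldl_cons,
      List.foldl_nil]
    set i : Int := (M : Int) + 1 + 1 with hidef
    have h2 : 2 ≤ i := by omega
    have hin : i ≤ n := by omega
    have hprev := ih (by omega)
    have hstep := first_branch n i h2 hin hn _ (by
      rw [show i - 1 = (M : Int) + 1 from by omega]
      exact hprev)
    have hJ : (0 : Int) ≤ min i (n / i) := by
      have h1 : 1 ≤ n / i := by rw [Int.le_ediv_iff_mul_le (by omega : (0 : Int) < i)]; omega
      omega
    have hfold := inner_fold n i h2 hin hn (min i (n / i)).toNat _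
      (by rw [Int.toNat_of_nonneg hJ]; omega)
      (by
        rw [Int.toNat_of_nonneg hJ]
        calc i * min i (n / i) ≤ i * (n / i) := by
              apply mul_le_mul_of_nonneg_left (min_le_right _ _) (by omega)
        _ ≤ n := by
              rw [mul_comm]
              exact Int.ediv_mul_le n (by omega))
      hstep
    rw [Int.toNat_of_nonneg hJ] at hfold
    rw [aInner_eq n i h2 hin hn]
    exact invB_to_invA n i h2 hin hn _ hfold

-- ---- phase 1: the divisor table ----

lemma getDl_set_self (l : List (List Int)) (t : Nat) (h : t < l.length) (v : List Int) :
    (l.set t v).getD t [] = v := by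
  simp [List.getD_eq_getElem?_getD, h]

lemma getDl_set_ne (l : List (List Int)) {s t : Nat} (h : s ≠ t) (v : List Int) :
    (l.set t v).getD s [] = l.getD s [] := by
  simp [List.getD_eq_getElem?_getD, List.getElem?_set_ne (show t ≠ s from fun h' => h h'.symm)]

lemma bAppend_length (d : Int) (divs : List (List Int)) (t : Int) (ht : 0 ≤ t) :
    (bAppend d divs t).length = divs.length := by
  unfold bAppend
  rw [PySem.List.pySetD_of_nonneg _ _ ht, List.length_set]

lemma bAppend_getD_self (d : Int) (divs : List (List Int)) (t : Int) (ht : 0 ≤ t)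
    (hlt : t.toNat < divs.length) :
    (bAppend d divs t).getD t.toNat [] = divs.getD t.toNat [] ++ [d] := by
  unfold bAppend
  rw [PySem.List.pySetD_of_nonneg _ _ ht, PySem.List.pyGetD_of_nonneg _ _ ht,
    getDl_set_self _ _ hlt]

lemma bAppend_getD_ne (d : Int) (divs : List (List Int)) (t : Int) (ht : 0 ≤ t)
    {s : Nat} (hs : s ≠ t.toNat) :
    (bAppend d divs t).getD s [] = divs.getD s [] := by
  unfold bAppend
  rw [PySem.List.pySetD_of_nonneg _ _ ht, getDl_set_ne _ hs]

lemma bAppend_fold (n d a : Int) (h2 : 2 ≤ d) (ha : 2 ≤ a) : ∀ (c : Nat)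
    (divs : List (List Int)), divs.length = n.toNat + 1 →
    ((((List.range c).map (fun (j : Nat) => a + d * (j : Int))).foldl (bAppend d) divs).length
        = n.toNat + 1) ∧
    ∀ t : Nat, t ≤ n.toNat →
      (((List.range c).map (fun (j : Nat) => a + d * (j : Int))).foldl (bAppend d) divs).getD t [] =
        if a ≤ (t : Int) ∧ (t : Int) < a + d * c ∧ d ∣ (t : Int) - a then
          divs.getD t [] ++ [d]
        else divs.getD t [] := by
  intro c
  induction c with
  | zero =>
    intro divs hlen
    refine ⟨hlen, fun t ht => ?_⟩
    rw [if_neg (by rintro ⟨h1, h2', -⟩; omega)]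
    rfl
  | succ c ih =>
    intro divs hlen
    rw [List.range_succ, List.map_append, List.foldl_append, List.map_cons, List.map_nil,
      List.foldl_cons, List.foldl_nil]
    obtain ⟨ihlen, ihv⟩ := ih divs hlen
    have hdc : (0 : Int) ≤ d * c := by positivity
    have hx : (0 : Int) ≤ a + d * c := by positivity
    have hring : a + d * ((c : Int) + 1) = (a + d * (c : Int)) + d := by ring
    refine ⟨by rw [bAppend_length _ _ _ hx]; exact ihlen, fun t ht => ?_⟩
    by_cases hteq : (t : Int) = a + d * c
    · have htn : t = (a + d * c).toNat := by omega
      subst htn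
      rw [bAppend_getD_self _ _ _ hx (by rw [ihlen]; omega), ihv _ ht,
        if_neg (by rintro ⟨-, hlt, -⟩; omega),
        if_pos ⟨by omega, by
          rw [Int.toNat_of_nonneg hx, show ((c + 1 : Nat) : Int) = (c : Int) + 1 from by
            push_cast; ring, hring]
          omega, ⟨(c : Int), by omega⟩⟩]
    · rw [bAppend_getD_ne _ _ _ hx (show t ≠ (a + d * c).toNat from by omega), ihv t ht]
      by_cases hc2 : a ≤ (t : Int) ∧ (t : Int) < a + d * c ∧ d ∣ (t : Int) - a
      · rw [if_pos hc2, if_pos ⟨hc2.1, by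
          rw [show ((c + 1 : Nat) : Int) = (c : Int) + 1 from by push_cast; ring, hring]
          omega, hc2.2.2⟩]
      · rw [if_neg hc2, if_neg (by
          rintro ⟨h1, hlt, q, hq⟩
          rw [show ((c + 1 : Nat) : Int) = (c : Int) + 1 from by push_cast; ring] at hlt
          apply hc2
          refine ⟨h1, ?_, ⟨q, hq⟩⟩
          have h5 : d * q < d * ((c : Int) + 1) := by omega
          have hqlt : q < (c : Int) + 1 := lt_of_mul_lt_mul_left h5 (by omega)
          have hqne : q ≠ (c : Int) := by
            intro hqe
            rw [hqe] at hq
            omega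
          have h6 : q ≤ (c : Int) - 1 := by omega
          have h7 : d * q ≤ d * ((c : Int) - 1) :=
            mul_le_mul_of_nonneg_left h6 (by omega)
          have h8 : d * ((c : Int) - 1) = d * (c : Int) - d := by ring
          omega)]

lemma inner_divs (n d : Int) (h2 : 2 ≤ d) (hdn : d * d ≤ n) (divs : List (List Int))
    (hlen : divs.length = n.toNat + 1) :
    (((PySem.List.pyRange (d * d) (n + 1) d).foldl (bAppend d) divs).length = n.toNat + 1) ∧
    ∀ t : Nat, t ≤ n.toNat →
      ((PySem.List.pyRange (d * d) (n + 1) d).foldl (bAppend d) divs).getD t [] =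
        if PySem.Int.mod (t : Int) d = 0 ∧ d * d ≤ (t : Int) then
          divs.getD t [] ++ [d]
        else divs.getD t [] := by
  rw [PySem.List.pyRange_of_pos _ _ (by omega : (0 : Int) < d), if_pos (by omega)]
  have h4 : (0 : Int) ≤ (n + 1 - d * d + d - 1) / d :=
    Int.ediv_nonneg (by omega) (by omega)
  have hcover : n + 1 - d * d ≤ d * ((((n + 1 - d * d + d - 1) / d).toNat : Nat) : Int) := by
    rw [Int.toNat_of_nonneg h4]
    have h1 := Int.mul_ediv_add_emod (n + 1 - d * d + d - 1) d
    have h2' := Int.emod_lt_of_pos (n + 1 - d * d + d - 1) (by omega : (0 : Int) < d)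
    have h3 := Int.emod_nonneg (n + 1 - d * d + d - 1) (by omega : d ≠ 0)
    omega
  have hdd : (4 : Int) ≤ d * d := by nlinarith
  obtain ⟨hl, hv⟩ := bAppend_fold n d (d * d) h2 (by nlinarith)
    ((n + 1 - d * d + d - 1) / d).toNat divs hlen
  refine ⟨hl, fun t ht => ?_⟩
  rw [hv t ht]
  by_cases hcond : PySem.Int.mod (t : Int) d = 0 ∧ d * d ≤ (t : Int)
  · obtain ⟨hmod, hdt⟩ := hcond
    obtain ⟨q, hq⟩ := (PySem.Int.mod_eq_zero_iff_dvd _ _).mp hmod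
    rw [if_pos ⟨hdt, by omega, ⟨q - d, by rw [hq]; ring⟩⟩,
      if_pos ⟨hmod, hdt⟩]
  · rw [if_neg (by
        rintro ⟨h1', -, q, hq⟩
        have hq2 : d * (q + d) = d * q + d * d := by ring
        exact hcond ⟨(PySem.Int.mod_eq_zero_iff_dvd _ _).mpr ⟨q + d, by omega⟩, h1'⟩),
      if_neg hcond]

-- the canonical small-divisor list of k (ascending)
def Dlist (k : Int) : List Int :=
  (PySem.List.pyRange 2 k).filter (fun d => decide (d * d ≤ k) && decide (PySem.Int.mod k d = 0))

lemma bDivs_outer (n : Int) (hn : 5 ≤ n) : ∀ (M : Nat), (M : Int) + 2 ≤ n + 2 →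
    (((PySem.List.pyRange 2 ((M : Int) + 2)).filter (fun d => decide (d * d ≤ n))).foldl
        (fun divs d => (PySem.List.pyRange (d * d) (n + 1) d).foldl (bAppend d) divs)
        (List.replicate (n + 1).toNat [])).length = n.toNat + 1 ∧
    ∀ t : Nat, t ≤ n.toNat →
      (((PySem.List.pyRange 2 ((M : Int) + 2)).filter (fun d => decide (d * d ≤ n))).foldl
          (fun divs d => (PySem.List.pyRange (d * d) (n + 1) d).foldl (bAppend d) divs)
          (List.replicate (n + 1).toNat [])).getD t [] =
        (PySem.List.pyRange 2 ((M : Int) + 2)).filter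
          (fun d => decide (PySem.Int.mod (t : Int) d = 0 ∧ d * d ≤ (t : Int))) := by
  intro M
  induction M with
  | zero =>
    intro _
    rw [show ((0 : Nat) : Int) + 2 = 2 from rfl, PySem.List.pyRange_one_eq_nil le_rfl]
    refine ⟨by simp; omega, fun t ht => ?_⟩
    simp only [List.filter_nil, List.foldl_nil]
    rw [List.getD_eq_getElem?_getD, List.getElem?_replicate, if_pos (by omega)]
    rfl
  | succ M ih =>
    intro hM
    obtain ⟨ihl, ihv⟩ := ih (by push_cast at hM ⊢; omega)
    rw [show ((M + 1 : Nat) : Int) + 2 = ((M : Int) + 2) + 1 from by push_cast; ring,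
      PySem.List.pyRange_one_succ_right (by omega), List.filter_append, List.foldl_append]
    set dcur : Int := (M : Int) + 2 with hdcur
    by_cases hp : dcur * dcur ≤ n
    · rw [show List.filter (fun d => decide (d * d ≤ n)) [dcur] = [dcur] from by
        simp [hp]]
      rw [List.foldl_cons, List.foldl_nil]
      obtain ⟨hl2, hv2⟩ := inner_divs n dcur (by omega) hp _ ihl
      refine ⟨hl2, fun t ht => ?_⟩
      rw [hv2 t ht, ihv t ht]
      by_cases hcond : PySem.Int.mod (t : Int) dcur = 0 ∧ dcur * dcur ≤ (t : Int)
      · rw [if_pos hcond]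
        rw [List.filter_append]
        simp [hcond]
      · rw [if_neg hcond, List.filter_append]
        rw [show List.filter (fun d => decide (PySem.Int.mod (t : Int) d = 0 ∧ d * d ≤ (t : Int)))
            [dcur] = [] from by simp [hcond]]
        simp
    · rw [show List.filter (fun d => decide (d * d ≤ n)) [dcur] = [] from by
        simp [hp]]
      rw [List.foldl_nil]
      refine ⟨ihl, fun t ht => ?_⟩
      rw [ihv t ht, List.filter_append]
      rw [show List.filter (fun d => decide (PySem.Int.mod (t : Int) d = 0 ∧ d * d ≤ (t : Int)))
          [dcur] = [] from by
        simp only [List.filter_cons, List.filter_nil, decide_eq_true_eq]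
        rw [if_neg (by rintro ⟨-, hdd⟩; omega)]]
      simp

lemma bDivs_spec (n : Int) (hn : 5 ≤ n) (k : Nat) (h5 : 2 ≤ k) (hk : k ≤ n.toNat) :
    (bDivs n).getD k [] = Dlist (k : Int) := by
  unfold bDivs
  rw [takeWhile_antitone_eq_filter _ _ (PySem.List.pairwise_lt_pyRange_one 2 (n + 1))
      (by
        intro x y hx hy hxy hpy
        simp only [decide_eq_true_eq] at *
        have hx2 : 2 ≤ x := (PySem.List.mem_pyRange_one.mp hx).1
        nlinarith)]
  obtain ⟨-, hv⟩ := bDivs_outer n hn (n.toNat - 1) (by omega)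
  rw [show ((n.toNat - 1 : Nat) : Int) + 2 = n + 1 from by omega] at hv
  rw [hv k hk]
  unfold Dlist
  rw [PySem.List.pyRange_one_append 2 (k : Int) (n + 1) (by omega) (by omega),
    List.filter_append]
  rw [show List.filter (fun d => decide (PySem.Int.mod (k : Int) d = 0 ∧ d * d ≤ (k : Int)))
      (PySem.List.pyRange (k : Int) (n + 1)) = [] from by
    rw [List.filter_eq_nil_iff]
    intro d hd
    have hd2 := (PySem.List.mem_pyRange_one.mp hd).1
    simp only [decide_eq_true_eq]
    rintro ⟨-, hdd⟩
    nlinarith]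
  rw [List.append_nil]
  exact List.filter_congr (fun d _ => by rw [Bool.decide_and, Bool.and_comm])

-- ---- phase 2: the dp pass ----

lemma bBest_eq_bInner (dp : List Int) (k : Int) :
    bBest dp k (Dlist k) = bInner dp k := by
  rw [bInner_eq_mfold]
  unfold bBest Dlist mfold
  rw [List.foldl_map]
  congr 1
  funext b d
  by_cases h2 : PySem.List.pyGetD dp (PySem.Int.floordiv k d) 0 + 1 < b <;>
    simp [h2, min_def]

lemma alt_fold (n : Int) (hn : 5 ≤ n) : ∀ (m : Nat), (m : Int) ≤ n - 4 →
    (PySem.List.pyRange 5 ((m : Int) + 5)).foldl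
      (fun dp k => dp ++ [bBest dp k (PySem.List.pyGetD (bDivs n) k [])]) [0, 1, 2, 3, 3] =
      build m := by
  intro m
  induction m with
  | zero =>
    intro _
    rw [show ((0 : Nat) : Int) + 5 = 5 from rfl, PySem.List.pyRange_one_eq_nil le_rfl]
    rfl
  | succ m ih =>
    intro hm
    rw [show ((m + 1 : Nat) : Int) + 5 = ((m : Int) + 5) + 1 from by push_cast; ring,
      PySem.List.pyRange_one_succ_right (by omega), List.foldl_append, List.foldl_cons,
      List.foldl_nil, ih (by push_cast at hm; omega)]
    show build m ++ [bBest (build m) ((m : Int) + 5) _] = build (m + 1)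
    rw [show PySem.List.pyGetD (bDivs n) ((m : Int) + 5) [] =
        (bDivs n).getD ((m : Int) + 5).toNat [] from
      PySem.List.pyGetD_of_nonneg _ _ (by omega)]
    rw [show (bDivs n).getD ((m : Int) + 5).toNat [] = Dlist (((m : Int) + 5).toNat : Int) from
      bDivs_spec n hn _ (by omega) (by push_cast at hm; omega)]
    rw [show ((((m : Int) + 5).toNat : Nat) : Int) = (m : Int) + 5 from by omega]
    rw [bBest_eq_bInner]
    rfl

lemma alt_build (n : Int) : populate_alt n = ((build (n - 4).toNat).map some) := by
  unfold populate_alt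
  show ((PySem.List.pyRange 5 (n + 1)).foldl
      (fun dp k => dp ++ [bBest dp k (PySem.List.pyGetD (bDivs n) k [])])
      [0, 1, 2, 3, 3]).map some = _
  congr 1
  rcases le_or_gt n 4 with h | h
  · rw [PySem.List.pyRange_one_eq_nil (by omega), show (n - 4).toNat = 0 from by omega]
    rfl
  · have := alt_fold n (by omega) (n - 4).toNat (by omega)
    rw [show n + 1 = (((n - 4).toNat : Nat) : Int) + 5 from by omega]
    exact this

lemma populate_eq_build (n : Int) : populate n = ((build (n - 4).toNat).map some) := by
  rcases le_or_gt n 1 with h1 | h1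
  · show (PySem.List.pyRange 2 (n + 1)).foldl _
      ([some 0, some 1, some 2, some 3, some 3] ++ List.replicate (n - 4).toNat none) = _
    rw [PySem.List.pyRange_one_eq_nil (by omega), show (n - 4).toNat = 0 from by omega,
      List.foldl_nil]
    rfl
  · rcases le_or_gt n 4 with h4 | h4
    · interval_cases n <;> decide
    · have hout := outer_fold n (by omega) (n.toNat - 1) (by omega)
      obtain ⟨hlen, hinv⟩ := hout
      show (PySem.List.pyRange 2 (n + 1)).foldl _
        ([some 0, some 1, some 2, some 3, some 3] ++ List.replicate (n - 4).toNat none) = _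
      rw [show n + 1 = ((n.toNat - 1 : Nat) : Int) + 1 + 1 from by omega]
      apply List.ext_getElem
      · rw [hlen, List.length_map, length_build]; omega
      · intro t h1t h2t
        have ht : t ≤ n.toNat := by
          have := h1t
          rw [hlen] at this
          omega
        have hcl := (hinv t ht).1 (Or.inr (by omega))
        rw [List.getD_eq_getElem?_getD, List.getElem?_eq_getElem h1t] at hcl
        simp only [Option.getD_some] at hcl
        rw [hcl, List.getElem_map]
        congr 1
        have hb : (build (n - 4).toNat).getD t 0 = f t := getD_build (by omega)
        rw [List.getD_eq_getElem?_getD,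
          List.getElem?_eq_getElem (by rw [length_build]; omega)] at hb
        simpa using hb.symm

-- ===== VERDICT (by name: the statement is the Claim_ definition above) =====
theorem populate_spec : Claim_equal_populate := by
  intro n _
  unfold Spec_populate
  rw [alt_build, populate_eq_build]
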